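-- pv_equiv track=rewrite | github.com/hyunjun/practice | python/problem-permutation/permuting_two_arrays.py | twoArrays0
-- ===== SOURCE A (Python) =====
-- from collections import defaultdict
--
-- def twoArrays0(k, A, B):
--     d, maxB = defaultdict(list), -float('inf')
--     for i, b in enumerate(B):
--         d[b].append(i)
--         maxB = max(maxB, b)
--     for a in A:
--         t = k - a
--         while t < maxB and t not in d:
--             t += 1
--         if t not in d or 0 == len(d[t]):
--             return 'NO'
--         d[t].pop()
--     return 'YES'
-- ===== SOURCE B (Python) =====
-- from collections import Counter
--
-- def twoArrays0(k, A, B):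
--     vals = sorted(set(B))                 # distinct B-values, ascending
--     remaining = Counter(B)                # multiplicity of each value
--     for a in A:
--         # binary search: first index with vals[lo] >= k - a
--         lo, hi = 0, len(vals)
--         while lo < hi:
--             mid = (lo + hi) // 2
--             if vals[mid] < k - a:
--                 lo = mid + 1
--             else:
--                 hi = mid
--         if lo == len(vals) or remaining[vals[lo]] == 0:
--             return 'NO'
--         remaining[vals[lo]] -= 1
--     return 'YES'
-- ===== Notes on version B (the rewrite author's own statement) =====
-- stated objective: faster
-- what changed: Replaces the dict-of-index-lists plus the t+=1 integer scan up the value range with sorted distinct values, a hand-rolled binary search for the smallest B-value >= k-a, and a Counter of remaining multiplicities.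
import Mathlib
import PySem

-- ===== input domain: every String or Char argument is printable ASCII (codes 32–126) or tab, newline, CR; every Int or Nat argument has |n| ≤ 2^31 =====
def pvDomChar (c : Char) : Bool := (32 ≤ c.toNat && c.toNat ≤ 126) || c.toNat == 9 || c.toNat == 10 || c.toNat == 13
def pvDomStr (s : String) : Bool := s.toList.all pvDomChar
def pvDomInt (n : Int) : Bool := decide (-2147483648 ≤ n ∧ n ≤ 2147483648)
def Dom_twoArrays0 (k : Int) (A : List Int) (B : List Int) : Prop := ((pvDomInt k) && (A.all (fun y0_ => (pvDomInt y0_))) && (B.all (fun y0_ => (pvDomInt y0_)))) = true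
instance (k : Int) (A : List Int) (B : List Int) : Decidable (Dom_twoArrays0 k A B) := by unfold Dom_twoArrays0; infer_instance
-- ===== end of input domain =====

-- B replaces A's dict-of-index-lists and its t+=1 scan up the value range by sorted distinct
-- values + binary search + a Counter of remaining multiplicities (faster; mutation of d is local to A).

-- ===== PORT A =====
-- maxB starts as -float('inf'); it is only ever compared with ints and updated by max,
-- so it is modelled exactly as Option Int with none = -inf; maxB = max(maxB, b):
def pvMaxF (m : Option Int) (b : Int) : Option Int :=
  match m with | none => some b | some mv => some (max mv b)

-- one step of 'for i, b in enumerate(B): d[b].append(i); maxB = max(maxB, b)'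
def pvStepA (st : PySem.Dict Int (List Int) × Option Int) (ib : Int × Int) :
    PySem.Dict Int (List Int) × Option Int :=
  (st.1.modify ib.2 [] (fun l => l ++ [ib.1]), pvMaxF st.2 ib.2)

-- while t < maxB and t not in d: t += 1
def pvScanA (d : PySem.Dict Int (List Int)) (m t : Int) : Int :=
  if h : t < m ∧ d.contains t = false then pvScanA d m (t + 1) else t
termination_by (m - t).toNat
decreasing_by omega

-- t after the while loop (when maxB is still -inf the loop does not run: t stays k - a)
def pvT (d : PySem.Dict Int (List Int)) (m : Option Int) (t : Int) : Int :=
  match m with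
  | none => t
  | some mv => pvScanA d mv t

-- for a in A: … (early return 'NO', else mutate d and continue)
def pvLoopA (k : Int) (d : PySem.Dict Int (List Int)) (m : Option Int) : List Int → String
  | [] => "YES"
  | a :: rest =>
    if d.contains (pvT d m (k - a)) = false ∨ (d.getD (pvT d m (k - a)) []).length = 0 then "NO"
    else pvLoopA k (d.modify (pvT d m (k - a)) [] (fun l => l.dropLast)) m rest   -- d[t].pop() pops last

def twoArrays0 (k : Int) (A : List Int) (B : List Int) : String :=
  let s := (PySem.List.enumerate B).foldl pvStepA (PySem.Dict.empty, none)
  pvLoopA k s.1 s.2 A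

-- ===== PORT B =====
-- while lo < hi: mid = (lo+hi)//2; if vals[mid] < k - a: lo = mid+1 else: hi = mid
-- (mid < vals.length whenever the loop runs with hi ≤ vals.length, so vals[mid] is in range: getD is exact)
def pvBS (vals : List Int) (t : Int) (lo hi : Nat) : Nat :=
  if lo < hi then
    if vals.getD ((lo + hi) / 2) 0 < t then pvBS vals t ((lo + hi) / 2 + 1) hi
    else pvBS vals t lo ((lo + hi) / 2)
  else lo
termination_by hi - lo
decreasing_by all_goals omega

def pvLoopB (k : Int) (vals : List Int) : PySem.Dict Int Int → List Int → String
  | _, [] => "YES"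
  | rem, a :: rest =>
    if pvBS vals (k - a) 0 vals.length = vals.length
       ∨ rem.getD (vals.getD (pvBS vals (k - a) 0 vals.length) 0) 0 = 0 then "NO"
    else pvLoopB k vals
      (rem.insert (vals.getD (pvBS vals (k - a) 0 vals.length) 0)
        (rem.getD (vals.getD (pvBS vals (k - a) 0 vals.length) 0) 0 - 1)) rest   -- remaining[vals[lo]] -= 1

def twoArrays0_alt (k : Int) (A : List Int) (B : List Int) : String :=
  let vals := PySem.List.sorted (PySem.Set.ofList B) (fun x => x) false   -- sorted(set(B))
  pvLoopB k vals (PySem.Dict.counter B) A                                  -- Counter(B)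

-- ===== PRECONDITION & SPEC =====
def Spec_twoArrays0 (k : Int) (A : List Int) (B : List Int) (out : String) : Prop := out = twoArrays0_alt k A B
instance (k : Int) (A : List Int) (B : List Int) (out : String) : Decidable (Spec_twoArrays0 k A B out) := by unfold Spec_twoArrays0; infer_instance

-- ===== CLAIM (what is proved, stated in full; the proofs are below) =====
def Claim_equal_twoArrays0 : Prop := ∀ (k : Int) (A : List Int) (B : List Int), Dom_twoArrays0 k A B → Spec_twoArrays0 k A B (twoArrays0 k A B)

-- ===== LEMMAS AND PROOFS =====

lemma pvMaxF_fold_isSome (B : List Int) (x : Int) :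
    (B.foldl pvMaxF (some x)).isSome = true := by
  induction B generalizing x with
  | nil => rfl
  | cons b rest ih => simpa [pvMaxF] using ih (max x b)

lemma pvMaxF_fold_eq_none (B : List Int) (h : B.foldl pvMaxF none = none) : B = [] := by
  cases B with
  | nil => rfl
  | cons b rest =>
    exfalso
    have := pvMaxF_fold_isSome rest b
    simp only [List.foldl, pvMaxF] at h
    rw [h] at this
    simp at this

lemma pvMaxF_fold_some_spec (B : List Int) (x mv : Int)
    (h : B.foldl pvMaxF (some x) = some mv) :
    (mv = x ∨ mv ∈ B) ∧ x ≤ mv ∧ ∀ b ∈ B, b ≤ mv := by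
  induction B generalizing x with
  | nil => simp at h; simp [h]
  | cons b rest ih =>
    simp only [List.foldl, pvMaxF] at h
    obtain ⟨h1, h2, h3⟩ := ih (max x b) h
    refine ⟨?_, le_trans (le_max_left x b) h2, ?_⟩
    · rcases h1 with h1 | h1
      · rcases max_choice x b with hx | hx <;> rw [hx] at h1
        · exact Or.inl h1
        · exact Or.inr (by simp [h1])
      · exact Or.inr (List.mem_cons_of_mem _ h1)
    · intro c hc
      rcases List.mem_cons.mp hc with rfl | hc
      · exact le_trans (le_max_right x c) h2
      · exact h3 c hc

lemma pvMaxF_fold_none_spec (B : List Int) (mv : Int)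
    (h : B.foldl pvMaxF none = some mv) : mv ∈ B ∧ ∀ b ∈ B, b ≤ mv := by
  cases B with
  | nil => simp at h
  | cons b rest =>
    simp only [List.foldl, pvMaxF] at h
    obtain ⟨h1, _, h3⟩ := pvMaxF_fold_some_spec rest b mv h
    refine ⟨?_, ?_⟩
    · rcases h1 with h1 | h1
      · simp [h1]
      · exact List.mem_cons_of_mem _ h1
    · intro c hc
      rcases List.mem_cons.mp hc with rfl | hc
      · obtain ⟨-, h2, -⟩ := pvMaxF_fold_some_spec rest c mv h; exact h2
      · exact h3 c hc

lemma pvBuild_snd (l : List (Int × Int)) (d : PySem.Dict Int (List Int)) (m : Option Int) :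
    (l.foldl pvStepA (d, m)).2 = (l.map (·.2)).foldl pvMaxF m := by
  induction l generalizing d m with
  | nil => rfl
  | cons p rest ih => simpa [pvStepA] using ih _ _

lemma pvBuild_contains (l : List (Int × Int)) (d : PySem.Dict Int (List Int)) (m : Option Int) (v : Int) :
    ((l.foldl pvStepA (d, m)).1.contains v = true ↔ (d.contains v = true ∨ v ∈ l.map (·.2))) := by
  induction l generalizing d m with
  | nil => simp
  | cons p rest ih =>
    simp only [List.foldl, pvStepA, List.map_cons, List.mem_cons]
    rw [ih]
    rw [PySem.Dict.contains_modify]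
    by_cases hv : v = p.2 <;> simp [hv]

lemma pvBuild_len (l : List (Int × Int)) (d : PySem.Dict Int (List Int)) (m : Option Int) (v : Int) :
    ((l.foldl pvStepA (d, m)).1.getD v []).length
      = (d.getD v []).length + (l.map (·.2)).count v := by
  induction l generalizing d m with
  | nil => simp
  | cons p rest ih =>
    simp only [List.foldl, pvStepA, List.map_cons, List.count_cons]
    rw [ih]
    rw [PySem.Dict.getD_modify]
    by_cases hv : v = p.2 <;> simp [hv, beq_iff_eq] <;> omega

-- the binary search returns the first index whose value is ≥ t (on a value-monotone list)
lemma pvBS_spec (vals : List Int) (t : Int)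
    (hmono : ∀ p q : Nat, p ≤ q → q < vals.length → vals.getD p 0 ≤ vals.getD q 0)
    (lo hi : Nat) (hlohi : lo ≤ hi) (hhi : hi ≤ vals.length)
    (hlow : ∀ j, j < lo → vals.getD j 0 < t)
    (hhigh : ∀ j, hi ≤ j → j < vals.length → t ≤ vals.getD j 0) :
    (∀ j, j < pvBS vals t lo hi → vals.getD j 0 < t) ∧
    (∀ j, pvBS vals t lo hi ≤ j → j < vals.length → t ≤ vals.getD j 0) ∧
    pvBS vals t lo hi ≤ vals.length := by
  rw [pvBS]
  split
  case isTrue h =>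
    split
    case isTrue hm =>
      refine pvBS_spec vals t hmono ((lo + hi) / 2 + 1) hi (by omega) hhi ?_ hhigh
      intro j hj
      exact lt_of_le_of_lt (hmono j ((lo + hi) / 2) (by omega) (by omega)) hm
    case isFalse hm =>
      refine pvBS_spec vals t hmono lo ((lo + hi) / 2) (by omega) (by omega) hlow ?_
      intro j hj1 hj2
      exact le_trans (le_of_not_gt hm) (hmono _ j hj1 hj2)
  case isFalse h =>
    exact ⟨hlow, fun j hj1 hj2 => hhigh j (by omega) hj2, by omega⟩
termination_by hi - lo
decreasing_by all_goals omega

-- A's incrementing scan finds the minimal key ≥ t, when one exists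
lemma pvScanA_eq (d : PySem.Dict Int (List Int)) (vals : List Int) (mv t w : Int)
    (hc : ∀ v : Int, d.contains v = true ↔ v ∈ vals)
    (hub : ∀ v ∈ vals, v ≤ mv)
    (hw : w ∈ vals) (htw : t ≤ w) (hmin : ∀ v ∈ vals, t ≤ v → w ≤ v) :
    pvScanA d mv t = w := by
  rw [pvScanA]
  split
  case isTrue h =>
    refine pvScanA_eq d vals mv (t + 1) w hc hub hw ?_ (fun v hv h1 => hmin v hv (by omega))
    have : t ≠ w := fun he => by rw [he, (hc w).mpr hw] at h; simp at h
    omega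
  case isFalse h =>
    by_cases hct : d.contains t = true
    · have htv : t ∈ vals := (hc t).mp hct
      exact le_antisymm (by omega) (hmin t htv le_rfl)
    · exfalso
      have h1 : ¬ t < mv := fun hlt => h ⟨hlt, by simpa using hct⟩
      have h2 := hub w hw
      have h3 : t = w := by omega
      exact hct (by rw [h3]; exact (hc w).mpr hw)
termination_by (mv - t).toNat
decreasing_by omega

-- the main loop equivalence, by induction over A with the state invariant
lemma pvLoop_eq (k : Int) (vals : List Int) (as' : List Int)
    (hmono : ∀ p q : Nat, p ≤ q → q < vals.length → vals.getD p 0 ≤ vals.getD q 0) :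
    ∀ (d : PySem.Dict Int (List Int)) (m : Option Int) (rem : PySem.Dict Int Int),
    (match m with
     | none => vals = []
     | some mv => mv ∈ vals ∧ ∀ v ∈ vals, v ≤ mv) →
    (∀ v : Int, d.contains v = true ↔ v ∈ vals) →
    (∀ v ∈ vals, ((d.getD v []).length : Int) = rem.getD v 0) →
    pvLoopA k d m as' = pvLoopB k vals rem as' := by
  induction as' with
  | nil => intro d m rem _ _ _; rfl
  | cons a rest ih =>
    intro d m rem hm hc hl
    obtain ⟨h1, h2, h3⟩ := pvBS_spec vals (k - a) hmono 0 vals.length (Nat.zero_le _) le_rfl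
      (by intro j hj; omega) (by intro j hj1 hj2; omega)
    cases m with
    | none =>
      have hv : vals = [] := hm
      subst hv
      have hct : d.contains (k - a) = false := by
        rcases hcc : d.contains (k - a) with _ | _
        · rfl
        · exact absurd ((hc _).mp hcc) (by simp)
      rw [pvLoopA, pvLoopB]
      simp only [pvT]
      rw [if_pos (Or.inl hct), if_pos (Or.inl (by simp [pvBS]))]
    | some mv =>
      obtain ⟨hmv, hub⟩ := hm
      by_cases hend : pvBS vals (k - a) 0 vals.length = vals.length
      · have halllt : ∀ v ∈ vals, v < k - a := by
          intro v hv
          obtain ⟨j, hj, rfl⟩ := List.mem_iff_getElem.mp hv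
          have := h1 j (by omega)
          rwa [List.getD_eq_getElem?_getD, List.getElem?_eq_getElem hj, Option.getD_some] at this
        have hscan : pvScanA d mv (k - a) = k - a := by
          rw [pvScanA, dif_neg]
          rintro ⟨hlt, -⟩
          have := halllt mv hmv
          omega
        have hcka : d.contains (k - a) = false := by
          rcases hcc : d.contains (k - a) with _ | _
          · rfl
          · exact absurd (halllt _ ((hc _).mp hcc)) (by omega)
        rw [pvLoopA, pvLoopB]
        simp only [pvT]
        rw [hscan, if_pos (Or.inl hcka), if_pos (Or.inl hend)]
      · have hlt : pvBS vals (k - a) 0 vals.length < vals.length := lt_of_le_of_ne h3 hend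
        have hgetw : vals.getD (pvBS vals (k - a) 0 vals.length) 0
            = vals[pvBS vals (k - a) 0 vals.length] := by
          rw [List.getD_eq_getElem?_getD, List.getElem?_eq_getElem hlt, Option.getD_some]
        have hwmem : vals.getD (pvBS vals (k - a) 0 vals.length) 0 ∈ vals := by
          rw [hgetw]; exact List.getElem_mem _
        have hwge : k - a ≤ vals.getD (pvBS vals (k - a) 0 vals.length) 0 :=
          h2 _ le_rfl hlt
        have hwmin : ∀ v ∈ vals, k - a ≤ v → vals.getD (pvBS vals (k - a) 0 vals.length) 0 ≤ v := by
          intro v hv hge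
          obtain ⟨j, hj, rfl⟩ := List.mem_iff_getElem.mp hv
          by_cases hjlo : j < pvBS vals (k - a) 0 vals.length
          · have := h1 j hjlo
            rw [List.getD_eq_getElem?_getD, List.getElem?_eq_getElem hj, Option.getD_some] at this
            omega
          · have hm2 := hmono (pvBS vals (k - a) 0 vals.length) j (by omega) hj
            have hj' : vals.getD j 0 = vals[j] := by
              rw [List.getD_eq_getElem?_getD, List.getElem?_eq_getElem hj, Option.getD_some]
            rw [hj'] at hm2
            exact hm2
        have hscan := pvScanA_eq d vals mv (k - a) _ hc hub hwmem hwge hwmin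
        have hcw : d.contains (vals.getD (pvBS vals (k - a) 0 vals.length) 0) = true :=
          (hc _).mpr hwmem
        have hlw := hl _ hwmem
        rw [pvLoopA, pvLoopB]
        simp only [pvT]
        rw [hscan]
        by_cases hz : (d.getD (vals.getD (pvBS vals (k - a) 0 vals.length) 0) []).length = 0
        · have hz' : rem.getD (vals.getD (pvBS vals (k - a) 0 vals.length) 0) 0 = 0 := by
            rw [← hlw, hz]; rfl
          rw [if_pos (Or.inr hz), if_pos (Or.inr hz')]
        · have hz' : ¬ rem.getD (vals.getD (pvBS vals (k - a) 0 vals.length) 0) 0 = 0 := by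
            rw [← hlw]; exact_mod_cast hz
          have hnA : ¬ (d.contains (vals.getD (pvBS vals (k - a) 0 vals.length) 0) = false
              ∨ (d.getD (vals.getD (pvBS vals (k - a) 0 vals.length) 0) []).length = 0) := by
            rintro (h | h)
            · rw [hcw] at h; exact absurd h (by simp)
            · exact hz h
          have hnB : ¬ (pvBS vals (k - a) 0 vals.length = vals.length
              ∨ rem.getD (vals.getD (pvBS vals (k - a) 0 vals.length) 0) 0 = 0) := by
            rintro (h | h)
            · exact hend h
            · exact hz' h
          rw [if_neg hnA, if_neg hnB]
          refine ih _ (some mv) _ ⟨hmv, hub⟩ ?_ ?_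
          · intro v
            rw [PySem.Dict.contains_modify]
            by_cases hvw : v = vals.getD (pvBS vals (k - a) 0 vals.length) 0
            · subst hvw
              simp only [Bool.or_eq_true, beq_self_eq_true]
              simp
              rw [← List.getD_eq_getElem?_getD]
              exact hwmem
            · simp [hc v]
              intro he
              rw [he, ← List.getD_eq_getElem?_getD]
              exact hwmem
          · intro v hv
            rw [PySem.Dict.getD_modify, PySem.Dict.getD_insert]
            by_cases hvw : v = vals.getD (pvBS vals (k - a) 0 vals.length) 0
            · subst hvw
              simp only [if_true]
              rw [List.length_dropLast, ← hlw]
              have hne : (d.getD (vals.getD (pvBS vals (k - a) 0 vals.length) 0) []).length ≠ 0 := hz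
              omega
            · rw [if_neg hvw, if_neg (by simpa using hvw)]
              exact hl v hv

-- ===== VERDICT (by name: the statement is the Claim_ definition above) =====
theorem twoArrays0_spec : Claim_equal_twoArrays0 := by
  intro k A B _
  unfold Spec_twoArrays0 twoArrays0 twoArrays0_alt
  show pvLoopA k ((PySem.List.enumerate B).foldl pvStepA (PySem.Dict.empty, none)).1
        ((PySem.List.enumerate B).foldl pvStepA (PySem.Dict.empty, none)).2 A
      = pvLoopB k (PySem.List.sorted (PySem.Set.ofList B) (fun x => x) false)
        (PySem.Dict.counter B) A
  have hmem : ∀ v : Int,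
      v ∈ PySem.List.sorted (PySem.Set.ofList B) (fun x => x) false ↔ v ∈ B := by
    intro v
    rw [PySem.List.mem_sorted, PySem.Set.mem_ofList]
  have hsnd : ((PySem.List.enumerate B).foldl pvStepA (PySem.Dict.empty, none)).2
      = B.foldl pvMaxF none := by
    rw [pvBuild_snd, PySem.List.map_snd_enumerate]
  have hmono : ∀ p q : Nat, p ≤ q →
      q < (PySem.List.sorted (PySem.Set.ofList B) (fun x => x) false).length →
      (PySem.List.sorted (PySem.Set.ofList B) (fun x => x) false).getD p 0
        ≤ (PySem.List.sorted (PySem.Set.ofList B) (fun x => x) false).getD q 0 := by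
    intro p q hpq hq
    rw [List.getD_eq_getElem?_getD, List.getElem?_eq_getElem (lt_of_le_of_lt hpq hq),
        Option.getD_some, List.getD_eq_getElem?_getD, List.getElem?_eq_getElem hq,
        Option.getD_some]
    exact PySem.List.sorted_id_getElem_mono (PySem.Set.ofList B) hpq hq
  refine pvLoop_eq k _ A hmono _ _ _ ?_ ?_ ?_
  · rw [hsnd]
    rcases h : B.foldl pvMaxF none with _ | mv
    · have hB : B = [] := pvMaxF_fold_eq_none B h
      subst hB
      rfl
    · obtain ⟨h1, h2⟩ := pvMaxF_fold_none_spec B mv h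
      exact ⟨(hmem mv).mpr h1, fun v hv => h2 v ((hmem v).mp hv)⟩
  · intro v
    rw [pvBuild_contains, PySem.List.map_snd_enumerate, hmem v]
    simp
  · intro v hv
    rw [pvBuild_len, PySem.List.map_snd_enumerate, PySem.Dict.getD_counter]
    simp
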